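-- pv_equiv track=rewrite | github.com/andrewsmike/rl_examples | rl_examples/envs/grid.py | velocity_env_args
-- ===== SOURCE A (Python) =====
-- def velocity_env_args(compact_world_str):
--     positions = [
--         (x, y)
--         for y, world_row_str in enumerate(compact_world_str.split("\n"))
--         for x, state_str in enumerate(world_row_str)
--         if state_str != " "
--     ]
--
--     start_positions = [
--         (x, y)
--         for y, world_row_str in enumerate(compact_world_str.split("\n"))
--         for x, state_str in enumerate(world_row_str)
--         if state_str == "S"
--     ]
--
--     end_positions = [
--         (x, y)
--         for y, world_row_str in enumerate(compact_world_str.split("\n"))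
--         for x, state_str in enumerate(world_row_str)
--         if state_str == "F"
--     ]
--
--     return {
--         "positions": positions,
--         "start_positions": start_positions,
--         "end_positions": end_positions,
--     }
-- ===== SOURCE B (Python) =====
-- def velocity_env_args(compact_world_str):
--     positions = []
--     start_positions = []
--     end_positions = []
--     x = 0
--     y = 0
--     for ch in compact_world_str:
--         if ch == "\n":
--             x = 0
--             y += 1
--         else:
--             if ch != " ":
--                 positions.append((x, y))
--             if ch == "S":
--                 start_positions.append((x, y))
--             if ch == "F":
--                 end_positions.append((x, y))
--             x += 1
--     return {
--         "positions": positions,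
--         "start_positions": start_positions,
--         "end_positions": end_positions,
--     }
-- ===== Notes on version B (the rewrite author's own statement) =====
-- stated objective: alternative
-- what changed: B never splits the string into rows: it makes a single pass over the raw character stream, maintaining an (x, y) cursor that resets x and increments y on each newline, instead of A's three row-splitting comprehensions over enumerated rows.
import Mathlib
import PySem

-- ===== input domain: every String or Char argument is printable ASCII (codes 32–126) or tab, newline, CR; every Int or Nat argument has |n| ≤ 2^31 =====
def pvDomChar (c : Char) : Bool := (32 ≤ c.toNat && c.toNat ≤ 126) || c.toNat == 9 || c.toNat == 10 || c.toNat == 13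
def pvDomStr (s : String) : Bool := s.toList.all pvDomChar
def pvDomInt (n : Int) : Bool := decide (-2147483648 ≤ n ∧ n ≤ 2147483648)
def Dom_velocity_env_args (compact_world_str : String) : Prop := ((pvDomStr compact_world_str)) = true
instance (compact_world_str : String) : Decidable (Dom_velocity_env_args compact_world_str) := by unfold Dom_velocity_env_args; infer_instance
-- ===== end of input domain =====

-- B replaces A's three row-splitting comprehensions by a single pass over the raw
-- character stream with an (x, y) cursor that resets on newlines (objective: alternative).

-- ===== PORT A =====
def velocity_env_args (compact_world_str : String) : List (String × List (Int × Int)) :=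
  let positions :=
    (PySem.List.enumerate (PySem.Chars.splitOn compact_world_str.toList ['\n'])).flatMap
      (fun yr => (PySem.List.enumerate yr.2).filterMap
        (fun xc => if xc.2 ≠ ' ' then some (xc.1, yr.1) else none))
  let start_positions :=
    (PySem.List.enumerate (PySem.Chars.splitOn compact_world_str.toList ['\n'])).flatMap
      (fun yr => (PySem.List.enumerate yr.2).filterMap
        (fun xc => if xc.2 = 'S' then some (xc.1, yr.1) else none))
  let end_positions :=
    (PySem.List.enumerate (PySem.Chars.splitOn compact_world_str.toList ['\n'])).flatMap
      (fun yr => (PySem.List.enumerate yr.2).filterMap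
        (fun xc => if xc.2 = 'F' then some (xc.1, yr.1) else none))
  [("positions", positions), ("start_positions", start_positions), ("end_positions", end_positions)]

-- ===== PORT B =====
-- B's loop state: (x, y, positions, start_positions, end_positions)
def pvStepB (st : Int × Int × List (Int × Int) × List (Int × Int) × List (Int × Int)) (c : Char) :
    Int × Int × List (Int × Int) × List (Int × Int) × List (Int × Int) :=
  if c = '\n' then
    (0, st.2.1 + 1, st.2.2)
  else
    (st.1 + 1, st.2.1,
     (if c ≠ ' ' then st.2.2.1 ++ [(st.1, st.2.1)] else st.2.2.1),
     (if c = 'S' then st.2.2.2.1 ++ [(st.1, st.2.1)] else st.2.2.2.1),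
     (if c = 'F' then st.2.2.2.2 ++ [(st.1, st.2.1)] else st.2.2.2.2))

def velocity_env_args_alt (compact_world_str : String) : List (String × List (Int × Int)) :=
  let st := compact_world_str.toList.foldl pvStepB (0, 0, [], [], [])
  [("positions", st.2.2.1), ("start_positions", st.2.2.2.1), ("end_positions", st.2.2.2.2)]

-- ===== PRECONDITION & SPEC =====
def Spec_velocity_env_args (compact_world_str : String) (out : List (String × List (Int × Int))) : Prop := out = velocity_env_args_alt compact_world_str
instance (compact_world_str : String) (out : List (String × List (Int × Int))) : Decidable (Spec_velocity_env_args compact_world_str out) := by unfold Spec_velocity_env_args; infer_instance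

-- ===== CLAIM (what is proved, stated in full; the proofs are below) =====
def Claim_equal_velocity_env_args : Prop := ∀ (compact_world_str : String), Dom_velocity_env_args compact_world_str → Spec_velocity_env_args compact_world_str (velocity_env_args compact_world_str)

-- ===== LEMMAS AND PROOFS =====

-- simple structural form of Python's s.split("\n")
def pvSplit : List Char → List (List Char)
  | [] => [[]]
  | c :: l =>
    if c = '\n' then [] :: pvSplit l
    else
      match pvSplit l with
      | r :: rs => (c :: r) :: rs
      | [] => [[c]]

theorem pvSplit_ne_nil (l : List Char) : pvSplit l ≠ [] := by
  cases l with
  | nil => simp [pvSplit]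
  | cons c l =>
    simp only [pvSplit]
    split_ifs
    · simp
    · cases h : pvSplit l <;> simp

theorem pv_go_eq (l : List Char) : ∀ (fuel : Nat) (cur : List Char) (acc : List (List Char)),
    l.length < fuel →
    PySem.Chars.splitOn.go ['\n'] fuel l cur acc =
      acc.reverse ++ (cur.reverse ++ (pvSplit l).headI) :: (pvSplit l).tail := by
  induction l with
  | nil =>
    intro fuel cur acc h
    match fuel with
    | fuel + 1 => simp [PySem.Chars.splitOn.go, pvSplit]
  | cons c l ih =>
    intro fuel cur acc h
    match fuel with
    | fuel + 1 =>
      rw [PySem.Chars.splitOn.go]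
      by_cases hc : c = '\n'
      · subst hc
        have hpre : List.isPrefixOf ['\n'] ('\n' :: l) = true := by
          simp [List.isPrefixOf]
        simp only [hpre, if_true, List.length_cons, List.length_nil,
          List.drop_succ_cons, List.drop_zero] at *
        rw [ih fuel [] (cur.reverse :: acc) (by omega)]
        obtain ⟨r, rs, hr⟩ : ∃ r rs, pvSplit l = r :: rs := by
          cases hh : pvSplit l with
          | nil => exact absurd hh (pvSplit_ne_nil l)
          | cons r rs => exact ⟨r, rs, rfl⟩
        simp [pvSplit, hr]
      · have hpre : List.isPrefixOf ['\n'] (c :: l) = false := by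
          simp [List.isPrefixOf]
          intro h'; exact absurd h'.symm hc
        simp only [hpre, Bool.false_eq_true, if_false, List.length_cons] at *
        rw [ih fuel (c :: cur) acc (by omega)]
        obtain ⟨r, rs, hr⟩ : ∃ r rs, pvSplit l = r :: rs := by
          cases hh : pvSplit l with
          | nil => exact absurd hh (pvSplit_ne_nil l)
          | cons r rs => exact ⟨r, rs, rfl⟩
        simp [pvSplit, hc, hr]

theorem pv_splitOn_eq (l : List Char) :
    PySem.Chars.splitOn l ['\n'] = pvSplit l := by
  rw [PySem.Chars.splitOn, pv_go_eq l (l.length + 1) [] [] (by omega)]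
  obtain ⟨r, rs, hr⟩ : ∃ r rs, pvSplit l = r :: rs := by
    cases hh : pvSplit l with
    | nil => exact absurd hh (pvSplit_ne_nil l)
    | cons r rs => exact ⟨r, rs, rfl⟩
  simp [hr]

-- B recast as structural recursion on the char list (pred-parametric, one list at a time)
def pvPosB (pred : Char → Bool) : List Char → Int → Int → List (Int × Int)
  | [], _, _ => []
  | c :: l, x, y =>
    if c = '\n' then pvPosB pred l 0 (y + 1)
    else (if pred c then [(x, y)] else []) ++ pvPosB pred l (x + 1) y

-- A's per-rows accumulation with explicit row index
def pvRowsPos (pred : Char → Bool) : List (List Char) → Int → List (Int × Int)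
  | [], _ => []
  | r :: rs, y =>
    (PySem.List.enumerate r).filterMap (fun xc => if pred xc.2 then some (xc.1, y) else none)
      ++ pvRowsPos pred rs (y + 1)

-- final cursor of B's scan
def pvFin : List Char → Int → Int → Int × Int
  | [], x, y => (x, y)
  | c :: l, x, y => if c = '\n' then pvFin l 0 (y + 1) else pvFin l (x + 1) y

theorem pv_foldl_eq (l : List Char) :
    ∀ (x y : Int) (p s f : List (Int × Int)),
    l.foldl pvStepB (x, y, p, s, f) =
      ((pvFin l x y).1, (pvFin l x y).2,
       p ++ pvPosB (fun c => c ≠ ' ') l x y,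
       s ++ pvPosB (fun c => c = 'S') l x y,
       f ++ pvPosB (fun c => c = 'F') l x y) := by
  induction l with
  | nil => intro x y p s f; simp [pvPosB, pvFin]
  | cons c l ih =>
    intro x y p s f
    by_cases hc : c = '\n'
    · subst hc
      simp only [List.foldl_cons, pvStepB, if_true, ih, pvPosB, pvFin]
    · simp only [List.foldl_cons, pvStepB, hc, if_false, ih, pvPosB, pvFin]
      split_ifs <;> simp_all

-- first row starts at offset x, later rows at 0
theorem pv_posB_split (pred : Char → Bool) (l : List Char) :
    ∀ (x y : Int),
    pvPosB pred l x y =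
      (PySem.List.enumerate (pvSplit l).headI x).filterMap
          (fun xc => if pred xc.2 then some (xc.1, y) else none)
        ++ pvRowsPos pred (pvSplit l).tail (y + 1) := by
  induction l with
  | nil =>
    intro x y
    simp [pvPosB, pvSplit, pvRowsPos, PySem.List.enumerate_nil]
  | cons c l ih =>
    intro x y
    by_cases hc : c = '\n'
    · subst hc
      obtain ⟨r, rs, hr⟩ : ∃ r rs, pvSplit l = r :: rs := by
        cases hh : pvSplit l with
        | nil => exact absurd hh (pvSplit_ne_nil l)
        | cons r rs => exact ⟨r, rs, rfl⟩
      simp only [pvPosB, if_true, ih 0 (y + 1), hr, pvSplit, List.headI, List.tail,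
        pvRowsPos, PySem.List.enumerate_nil, List.filterMap_nil, List.nil_append]
    · obtain ⟨r, rs, hr⟩ : ∃ r rs, pvSplit l = r :: rs := by
        cases hh : pvSplit l with
        | nil => exact absurd hh (pvSplit_ne_nil l)
        | cons r rs => exact ⟨r, rs, rfl⟩
      simp only [pvPosB, hc, if_false, ih (x + 1) y, hr, pvSplit, List.headI,
        List.tail, PySem.List.enumerate_cons, List.filterMap_cons]
      split_ifs <;> simp

theorem pv_flatMap_rows (pred : Char → Bool) (rs : List (List Char)) :
    ∀ y : Int,
    (PySem.List.enumerate rs y).flatMap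
        (fun yr => (PySem.List.enumerate yr.2).filterMap
          (fun xc => if pred xc.2 then some (xc.1, yr.1) else none)) =
      pvRowsPos pred rs y := by
  induction rs with
  | nil => intro y; simp [PySem.List.enumerate_nil, pvRowsPos]
  | cons r rs ih =>
    intro y
    simp only [PySem.List.enumerate_cons, List.flatMap_cons, ih, pvRowsPos]

theorem pv_A_list (pred : Char → Bool) (l : List Char) :
    (PySem.List.enumerate (PySem.Chars.splitOn l ['\n'])).flatMap
        (fun yr => (PySem.List.enumerate yr.2).filterMap
          (fun xc => if pred xc.2 then some (xc.1, yr.1) else none)) =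
      pvPosB pred l 0 0 := by
  rw [pv_splitOn_eq]
  obtain ⟨r, rs, hr⟩ : ∃ r rs, pvSplit l = r :: rs := by
    cases hh : pvSplit l with
    | nil => exact absurd hh (pvSplit_ne_nil l)
    | cons r rs => exact ⟨r, rs, rfl⟩
  rw [pv_posB_split pred l 0 0, hr]
  simp only [List.headI, List.tail, PySem.List.enumerate_cons, List.flatMap_cons,
    pv_flatMap_rows]

-- ===== VERDICT (by name: the statement is the Claim_ definition above) =====
theorem velocity_env_args_spec : Claim_equal_velocity_env_args := by
  intro s _
  unfold Spec_velocity_env_args velocity_env_args velocity_env_args_alt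
  rw [pv_foldl_eq s.toList 0 0 [] [] []]
  simp only [List.nil_append]
  refine congrArg₂ _ ?_ (congrArg₂ _ ?_ (congrArg₂ _ ?_ rfl)) <;>
    refine congrArg _ ?_
  · have := pv_A_list (fun c => c ≠ ' ') s.toList
    simpa using this
  · have := pv_A_list (fun c => c = 'S') s.toList
    simpa using this
  · have := pv_A_list (fun c => c = 'F') s.toList
    simpa using this
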